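-- pv_equiv track=rewrite | github.com/enyx24/slidenfile | ml/pyfordummy/asm1_6.py | check
-- ===== SOURCE A (Python) =====
-- def check(a, b):
--     if len(a) != len(b):
--         return False
--     dicta = {}
--     for i in range(len(a)):
--         dicta[a[i]] = []
--     for i in range(len(a)):
--         dicta[a[i]].append(i)
--
--     for j in range(len(b)):
--         flag = False
--         if b[j] not in dicta:
--             return False
--         for i in dicta[b[j]]:
--             if abs(i-j+1)%2 == 1:
--                 dicta[b[j]].remove(i)
--                 flag = True
--                 break
--         if flag == False:
--             return False
--     return True
-- ===== SOURCE B (Python) =====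
-- def check(a, b):
--     if len(a) != len(b):
--         return False
--     cnt = {}
--     for i, ch in enumerate(a):
--         k = (ch, i % 2)
--         cnt[k] = cnt.get(k, 0) + 1
--     for j, ch in enumerate(b):
--         k = (ch, j % 2)
--         if cnt.get(k, 0) == 0:
--             return False
--         cnt[k] = cnt.get(k, 0) - 1
--     return True
-- ===== Notes on version B (the rewrite author's own statement) =====
-- stated objective: faster
-- what changed: Replaces the per-character index lists with an inner linear scan-and-remove by a single (char, index parity) counter built in one pass and decremented per position of b, removing the inner scan entirely.
import Mathlib
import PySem

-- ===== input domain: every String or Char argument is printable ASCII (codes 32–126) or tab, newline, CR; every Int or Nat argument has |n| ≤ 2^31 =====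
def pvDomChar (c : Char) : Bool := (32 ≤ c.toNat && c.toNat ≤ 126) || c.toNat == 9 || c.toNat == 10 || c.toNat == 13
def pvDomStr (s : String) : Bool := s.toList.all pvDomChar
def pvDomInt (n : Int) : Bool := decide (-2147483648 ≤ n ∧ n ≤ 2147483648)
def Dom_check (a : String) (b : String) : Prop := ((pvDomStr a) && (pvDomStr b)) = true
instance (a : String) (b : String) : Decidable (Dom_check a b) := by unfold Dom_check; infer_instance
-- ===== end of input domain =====

-- B replaces A's per-character index lists with inner scan-and-remove by a single
-- (character, index-parity) counter, decremented once per position of b (objective: faster).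

-- ===== PORT A =====
-- inner 'for i in dicta[b[j]]: if abs(i-j+1)%2 == 1: … break' — returns the i found, none if the loop falls through
def checkInnerFind (j : Int) : List Int → Option Int
  | [] => none
  | i :: rest => if (i - j + 1).natAbs % 2 == 1 then some i else checkInnerFind j rest

-- the 'for j in range(len(b))' loop with its early returns; state = dicta
def checkLoopA : PySem.Dict Char (List Int) → List (Int × Char) → Bool
  | _, [] => true
  | d, (j, c) :: rest =>
    match d.get? c with
    | none => false          -- 'if b[j] not in dicta: return False'
    | some lst =>
      match checkInnerFind j lst with
      | none => false        -- 'if flag == False: return False'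
      | some i => checkLoopA (d.insert c ((PySem.List.remove? lst i).getD lst)) rest

def check (a : String) (b : String) : Bool :=
  let la := a.toList
  let lb := b.toList
  if la.length ≠ lb.length then false
  else
    let d1 := (PySem.List.enumerate la 0).foldl (fun d p => d.insert p.2 ([] : List Int)) PySem.Dict.empty
    let d2 := (PySem.List.enumerate la 0).foldl (fun d p => d.modify p.2 [] (· ++ [p.1])) d1
    checkLoopA d2 (PySem.List.enumerate lb 0)

-- ===== PORT B =====
-- the 'for j, ch in enumerate(b)' loop; state = the counter
def checkLoopB : PySem.Dict (Char × Int) Int → List (Int × Char) → Bool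
  | _, [] => true
  | d, (j, c) :: rest =>
    if d.getD (c, PySem.Int.mod j 2) 0 == 0 then false
    else checkLoopB (d.insert (c, PySem.Int.mod j 2) (d.getD (c, PySem.Int.mod j 2) 0 - 1)) rest

def check_alt (a : String) (b : String) : Bool :=
  let la := a.toList
  let lb := b.toList
  if la.length ≠ lb.length then false
  else
    let cnt := (PySem.List.enumerate la 0).foldl
      (fun d p => d.modify (p.2, PySem.Int.mod p.1 2) 0 (· + 1)) PySem.Dict.empty
    checkLoopB cnt (PySem.List.enumerate lb 0)

-- ===== PRECONDITION & SPEC =====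
def Spec_check (a : String) (b : String) (out : Bool) : Prop := out = check_alt a b
instance (a : String) (b : String) (out : Bool) : Decidable (Spec_check a b out) := by unfold Spec_check; infer_instance

-- ===== CLAIM (what is proved, stated in full; the proofs are below) =====
def Claim_equal_check : Prop := ∀ (a : String) (b : String), Dom_check a b → Spec_check a b (check a b)

-- ===== LEMMAS AND PROOFS =====

-- Python's % with positive divisor 2 is Lean's emod
theorem checkModTwo (i : Int) : PySem.Int.mod i 2 = i % 2 :=
  PySem.Int.mod_eq_emod_of_pos (by omega)

-- 'abs(i-j+1) % 2 == 1' is 'i and j have the same parity'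
theorem checkCond_eq (i j : Int) :
    ((i - j + 1).natAbs % 2 == 1) = ((i % 2 : Int) == j % 2) := by
  rw [Bool.eq_iff_iff]
  simp only [beq_iff_eq]
  omega

theorem checkInnerFind_cons (j i : Int) (rest : List Int) :
    checkInnerFind j (i :: rest)
      = if (i % 2 : Int) == j % 2 then some i else checkInnerFind j rest := by
  rw [checkInnerFind, checkCond_eq]

theorem checkInnerFind_none (j : Int) (l : List Int) :
    checkInnerFind j l = none ↔ ∀ x ∈ l, ¬ x % 2 = j % 2 := by
  induction l with
  | nil => simp [checkInnerFind]
  | cons x t ih =>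
    by_cases h : x % 2 = j % 2
    · simp [checkInnerFind_cons, h]
    · simp [checkInnerFind_cons, h, ih]

theorem checkInnerFind_some (j : Int) (l : List Int) (i : Int)
    (h : checkInnerFind j l = some i) :
    ∃ pre post, l = pre ++ i :: post ∧ (∀ x ∈ pre, ¬ x % 2 = j % 2) ∧ i % 2 = j % 2 := by
  induction l with
  | nil => simp [checkInnerFind] at h
  | cons x t ih =>
    rw [checkInnerFind_cons] at h
    by_cases hc : x % 2 = j % 2
    · rw [if_pos (by simp [hc])] at h
      obtain rfl : x = i := by simpa using h
      exact ⟨[], t, rfl, by simp, hc⟩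
    · rw [if_neg (by simp [hc])] at h
      obtain ⟨pre, post, rfl, hpre, hi⟩ := ih h
      refine ⟨x :: pre, post, rfl, ?_, hi⟩
      intro y hy
      rcases List.mem_cons.mp hy with rfl | hy
      · exact hc
      · exact hpre y hy

-- list.remove of the element the inner loop found removes exactly that position
theorem checkRemove_found (j i : Int) (pre post : List Int)
    (hpre : ∀ x ∈ pre, ¬ x % 2 = j % 2) (hi : i % 2 = j % 2) :
    PySem.List.remove? (pre ++ i :: post) i = some (pre ++ post) := by
  induction pre with
  | nil => simp
  | cons x t ih =>
    have hxi : x ≠ i := fun hxe => hpre x (by simp) (hxe ▸ hi)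
    rw [List.cons_append, PySem.List.remove?_cons_of_ne _ hxi,
      ih (fun y hy => hpre y (List.mem_cons_of_mem x hy))]
    rfl

-- the invariant tying A's dict-of-index-lists to B's (char, parity) counter
def checkInv (d : PySem.Dict Char (List Int)) (cnt : PySem.Dict (Char × Int) Int) : Prop :=
  ∀ (c : Char) (p : Int),
    cnt.getD (c, p) 0 = ((d.getD c []).countP (fun i => (i % 2 : Int) == p) : Int)

theorem checkLoop_eq (l : List (Int × Char)) :
    ∀ d cnt, checkInv d cnt → checkLoopA d l = checkLoopB cnt l := by
  induction l with
  | nil => intro d cnt _; rfl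
  | cons hd tl ih =>
    obtain ⟨j, c⟩ := hd
    intro d cnt hInv
    have hkey := hInv c (j % 2)
    cases hget : d.get? c with
    | none =>
      have hl : d.getD c [] = [] := by simp [PySem.Dict.getD, hget]
      rw [hl] at hkey
      simp only [List.countP_nil, Nat.cast_zero] at hkey
      simp [checkLoopA, checkLoopB, hget, hkey]
    | some lst =>
      have hl : d.getD c [] = lst := by simp [PySem.Dict.getD, hget]
      rw [hl] at hkey
      cases hfind : checkInnerFind j lst with
      | none =>
        have h0 : lst.countP (fun i => (i % 2 : Int) == j % 2) = 0 :=
          List.countP_eq_zero.mpr (by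
            intro x hx
            simpa using (checkInnerFind_none j lst).mp hfind x hx)
        rw [h0] at hkey
        simp only [Nat.cast_zero] at hkey
        simp [checkLoopA, checkLoopB, hget, hfind, hkey]
      | some i =>
        obtain ⟨pre, post, hlst, hpre, hi⟩ := checkInnerFind_some j lst i hfind
        subst hlst
        have hib : ((i % 2 : Int) == j % 2) = true := by simp [hi]
        have hrem := checkRemove_found j i pre post hpre hi
        have hpos : 0 < (pre ++ i :: post).countP (fun x => (x % 2 : Int) == j % 2) :=
          List.countP_pos_iff.mpr ⟨i, by simp, hib⟩
        have hcnt_ne : ¬ cnt.getD (c, (j % 2 : Int)) 0 = 0 := by rw [hkey]; omega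
        have stepA : checkLoopA d ((j, c) :: tl) = checkLoopA (d.insert c (pre ++ post)) tl := by
          simp [checkLoopA, hget, hfind, hrem]
        have stepB : checkLoopB cnt ((j, c) :: tl)
            = checkLoopB (cnt.insert (c, j % 2) (cnt.getD (c, j % 2) 0 - 1)) tl := by
          simp [checkLoopB, hcnt_ne]
        rw [stepA, stepB]
        apply ih
        intro c' p'
        rw [PySem.Dict.getD_insert, PySem.Dict.getD_insert]
        by_cases hc : c' = c
        · subst hc
          by_cases hp : p' = j % 2
          · subst hp
            rw [if_pos rfl, if_pos rfl, hkey]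
            simp only [List.countP_append, List.countP_cons, hib, if_true]
            push_cast
            omega
          · rw [if_neg (by simp [hp]), if_pos rfl]
            have hthis := hInv c' p'
            rw [hl] at hthis
            rw [hthis]
            have hip : ((i % 2 : Int) == p') = false := by
              simp only [beq_eq_false_iff_ne, ne_eq, hi]
              exact fun he => hp he.symm
            simp only [List.countP_append, List.countP_cons, hip]
            simp
        · rw [if_neg (by simp [hc]), if_neg hc]
          exact hInv c' p'

-- phase 1 of A's build keeps every entry at []
theorem checkPhase1 (l : List (Int × Char)) :
    ∀ (d : PySem.Dict Char (List Int)), (∀ c, d.getD c ([] : List Int) = []) →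
      ∀ c, (l.foldl (fun d p => d.insert p.2 ([] : List Int)) d).getD c [] = [] := by
  induction l with
  | nil => intro d h c; exact h c
  | cons hd tl ih =>
    intro d h c
    refine ih _ (fun c' => ?_) c
    rw [PySem.Dict.getD_insert]
    split
    · rfl
    · exact h c'

-- counting a key in the mapped (char, parity) stream = counting matching-parity indices of that char
theorem checkCount_key (l : List (Int × Char)) (c : Char) (p : Int) :
    List.count (c, p) (l.map (fun q => (q.2, PySem.Int.mod q.1 2)))
      = (((l.map Prod.swap).filter (fun q => q.1 == c)).map (·.2)).countP
          (fun i => (i % 2 : Int) == p) := by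
  induction l with
  | nil => simp
  | cons hd tl ih =>
    obtain ⟨j, ch⟩ := hd
    simp only [checkModTwo] at ih
    simp only [List.map_cons, Prod.swap_prod_mk, List.filter_cons, List.count_cons, checkModTwo]
    by_cases hc : ch = c
    · subst hc
      simp only [beq_self_eq_true, if_true, List.map_cons, List.countP_cons, ih]
      by_cases hp : (j % 2 : Int) = p
      · simp only [hp, beq_self_eq_true, if_true]
      · have h1 : (((ch, j % 2) : Char × Int) == (ch, p)) = false := by
          simp [Prod.ext_iff, hp]
        have h2 : ((j % 2 : Int) == p) = false := by simp [hp]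
        simp only [h1, h2]
    · have h1 : ((ch : Char) == c) = false := by simp [hc]
      have h2 : (((ch, j % 2) : Char × Int) == (c, p)) = false := by
        simp [Prod.ext_iff, hc]
      simp only [h1, h2, if_false, Bool.false_eq_true, ih]
      omega

-- the built states satisfy the invariant
theorem checkInit (la : List Char) :
    checkInv
      ((PySem.List.enumerate la 0).foldl (fun d p => d.modify p.2 [] (· ++ [p.1]))
        ((PySem.List.enumerate la 0).foldl (fun d p => d.insert p.2 ([] : List Int)) PySem.Dict.empty))
      ((PySem.List.enumerate la 0).foldl
        (fun d p => d.modify (p.2, PySem.Int.mod p.1 2) 0 (· + 1)) PySem.Dict.empty) := by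
  intro c p
  have hcnt :
      ((PySem.List.enumerate la 0).foldl
          (fun d p => d.modify (p.2, PySem.Int.mod p.1 2) 0 (· + 1))
          (PySem.Dict.empty : PySem.Dict (Char × Int) Int)).getD (c, p) 0
        = (PySem.Dict.empty : PySem.Dict (Char × Int) Int).getD (c, p) 0
          + List.count (c, p) ((PySem.List.enumerate la 0).map (fun q => (q.2, PySem.Int.mod q.1 2))) := by
    rw [← PySem.Dict.getD_foldl_modify_add_one
      ((PySem.List.enumerate la 0).map (fun q => (q.2, PySem.Int.mod q.1 2)))]
    rw [List.foldl_map]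
  have hd2 :
      ((PySem.List.enumerate la 0).foldl (fun d p => d.modify p.2 [] (· ++ [p.1]))
          ((PySem.List.enumerate la 0).foldl (fun d p => d.insert p.2 ([] : List Int))
            PySem.Dict.empty)).getD c []
        = ((PySem.List.enumerate la 0).foldl (fun d p => d.insert p.2 ([] : List Int))
            PySem.Dict.empty).getD c []
          ++ (((PySem.List.enumerate la 0).map Prod.swap).filter (fun q => q.1 == c)).map (·.2) := by
    rw [← PySem.Dict.getD_foldl_modify_append
      ((PySem.List.enumerate la 0).map Prod.swap)]
    rw [List.foldl_map]
    rfl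
  rw [hcnt, hd2, checkPhase1 _ _ (fun c' => rfl) c]
  simp only [List.nil_append]
  rw [checkCount_key]
  simp [PySem.Dict.getD]

-- ===== VERDICT (by name: the statement is the Claim_ definition above) =====
theorem check_spec : Claim_equal_check := by
  intro a b _
  unfold Spec_check check check_alt
  simp only []
  by_cases h : a.toList.length ≠ b.toList.length
  · rw [if_pos h, if_pos h]
  · rw [if_neg h, if_neg h]
    exact checkLoop_eq _ _ _ (checkInit a.toList)
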